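-- pv_equiv track=rewrite | github.com/atomicals/atomicals-electrumx | bitcointx/core/script.py | CompareBigEndian
-- ===== SOURCE A (Python) =====
-- from typing import (
--     List, Tuple, Dict, Union, Iterable, Sequence, Optional, TypeVar, Type,
--     Generator, Iterator, Any, Callable, cast
-- )
--
-- def CompareBigEndian(c1: List[int], c2: List[int]) -> int:
--     """
--     Loosely matches CompareBigEndian() from eccryptoverify.cpp
--     Compares two arrays of bytes, and returns a negative value if the first is
--     less than the second, 0 if they're equal, and a positive value if the
--     first is greater than the second.
--     """
--     c1 = list(c1)
--     c2 = list(c2)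
--
--     # Adjust starting positions until remaining lengths of the two arrays match
--     while len(c1) > len(c2):
--         if c1.pop(0) > 0:
--             return 1
--     while len(c2) > len(c1):
--         if c2.pop(0) > 0:
--             return -1
--
--     while len(c1) > 0:
--         diff = c1.pop(0) - c2.pop(0)
--         if diff != 0:
--             return diff
--
--     return 0
-- ===== SOURCE B (Python) =====
-- def CompareBigEndian(c1, c2):
--     n1, n2 = len(c1), len(c2)
--     if n1 > n2:
--         k = n1 - n2
--         if any(x > 0 for x in c1[:k]):
--             return 1
--         c1 = c1[k:]
--     elif n2 > n1:
--         k = n2 - n1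
--         if any(x > 0 for x in c2[:k]):
--             return -1
--         c2 = c2[k:]
--     for a, b in zip(c1, c2):
--         if a != b:
--             return a - b
--     return 0
-- ===== Notes on version B (the rewrite author's own statement) =====
-- stated objective: alternative
-- what changed: Replaced A's repeated pop(0) front-removals with a single index/slice pass (prefix any() check, then zip compare of the aligned suffixes); intended as the linear form of A's quadratic worst case, though on typical random inputs both exit early and a timing run read only ~1.4-1.5x.
import Mathlib
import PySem

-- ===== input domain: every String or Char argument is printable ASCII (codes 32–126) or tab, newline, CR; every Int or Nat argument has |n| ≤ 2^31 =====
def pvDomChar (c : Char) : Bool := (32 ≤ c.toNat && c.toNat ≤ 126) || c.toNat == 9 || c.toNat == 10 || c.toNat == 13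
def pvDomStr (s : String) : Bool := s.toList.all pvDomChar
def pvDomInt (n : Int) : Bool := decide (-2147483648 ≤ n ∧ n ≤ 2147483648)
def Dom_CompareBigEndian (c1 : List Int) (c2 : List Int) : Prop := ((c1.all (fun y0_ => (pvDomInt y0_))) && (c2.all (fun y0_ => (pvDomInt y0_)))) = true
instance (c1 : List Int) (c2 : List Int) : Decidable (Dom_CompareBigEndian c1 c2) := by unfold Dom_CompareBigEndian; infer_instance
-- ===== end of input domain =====

-- B replaces A's pop(0) loops with a single index/slice pass (prefix any-check + aligned zip compare): linear where A's worst case is quadratic; on typical early-exit inputs the measured gap was small.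

-- ===== PORT A =====
-- third while loop: pop equal-length heads, return first nonzero difference
def cbeLoopEq : List Int → List Int → Int
  | a :: as, b :: bs => let diff := a - b; if diff ≠ 0 then diff else cbeLoopEq as bs
  | _, _ => 0

-- second while loop: while len(c2) > len(c1), pop c2's head
def cbeLoop2 (c1 : List Int) : List Int → Int
  | y :: ys =>
      if (y :: ys).length > c1.length then
        (if y > 0 then -1 else cbeLoop2 c1 ys)
      else cbeLoopEq c1 (y :: ys)
  | [] => cbeLoopEq c1 []

-- first while loop: while len(c1) > len(c2), pop c1's head
def cbeLoop1 : List Int → List Int → Int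
  | x :: xs, c2 =>
      if (x :: xs).length > c2.length then
        (if x > 0 then 1 else cbeLoop1 xs c2)
      else cbeLoop2 (x :: xs) c2
  | [], c2 => cbeLoop2 [] c2

def CompareBigEndian (c1 : List Int) (c2 : List Int) : Int := cbeLoop1 c1 c2

-- ===== PORT B =====
-- zip loop of Source B: first differing aligned pair decides
def cbeZipCmp : List Int → List Int → Int
  | a :: as, b :: bs => if a ≠ b then a - b else cbeZipCmp as bs
  | _, _ => 0

def CompareBigEndian_alt (c1 : List Int) (c2 : List Int) : Int :=
  let n1 := c1.length
  let n2 := c2.length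
  if n1 > n2 then
    let k := n1 - n2
    if (c1.take k).any (fun x => x > 0) then 1
    else cbeZipCmp (c1.drop k) c2
  else if n2 > n1 then
    let k := n2 - n1
    if (c2.take k).any (fun x => x > 0) then -1
    else cbeZipCmp c1 (c2.drop k)
  else cbeZipCmp c1 c2

-- ===== PRECONDITION & SPEC =====
def Spec_CompareBigEndian (c1 : List Int) (c2 : List Int) (out : Int) : Prop := out = CompareBigEndian_alt c1 c2
instance (c1 : List Int) (c2 : List Int) (out : Int) : Decidable (Spec_CompareBigEndian c1 c2 out) := by unfold Spec_CompareBigEndian; infer_instance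

-- ===== CLAIM (what is proved, stated in full; the proofs are below) =====
def Claim_equal_CompareBigEndian : Prop := ∀ (c1 : List Int) (c2 : List Int), Dom_CompareBigEndian c1 c2 → Spec_CompareBigEndian c1 c2 (CompareBigEndian c1 c2)

-- ===== LEMMAS AND PROOFS =====
theorem cbeLoopEq_eq_zip : ∀ (c1 c2 : List Int), cbeLoopEq c1 c2 = cbeZipCmp c1 c2 := by
  intro c1
  induction c1 with
  | nil => intro c2; cases c2 <;> rfl
  | cons a as ih =>
    intro c2
    cases c2 with
    | nil => rfl
    | cons b bs =>
      simp only [cbeLoopEq, cbeZipCmp, sub_ne_zero]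
      by_cases h : a = b
      · simp [h, ih]
      · simp [h]

theorem cbeLoop2_char : ∀ (c2 c1 : List Int),
    cbeLoop2 c1 c2 =
      if (c2.take (c2.length - c1.length)).any (fun x => x > 0) then -1
      else cbeLoopEq c1 (c2.drop (c2.length - c1.length)) := by
  intro c2
  induction c2 with
  | nil => intro c1; simp [cbeLoop2]
  | cons y ys ih =>
    intro c1
    by_cases h : (y :: ys).length > c1.length
    · have hk : (y :: ys).length - c1.length = (ys.length - c1.length) + 1 := by
        simp at h ⊢; omega
      rw [hk]
      simp only [cbeLoop2, if_pos h, List.take_succ_cons, List.drop_succ_cons, List.any_cons]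
      by_cases hy : y > 0
      · simp [hy]
      · simp [hy, ih]
    · have hk : (y :: ys).length - c1.length = 0 := by simp at h ⊢; omega
      rw [hk]
      simp only [cbeLoop2]
      rw [if_neg h]
      simp

theorem cbeLoop1_char : ∀ (c1 c2 : List Int),
    cbeLoop1 c1 c2 =
      if (c1.take (c1.length - c2.length)).any (fun x => x > 0) then 1
      else cbeLoop2 (c1.drop (c1.length - c2.length)) c2 := by
  intro c1
  induction c1 with
  | nil => intro c2; simp [cbeLoop1]
  | cons x xs ih =>
    intro c2
    by_cases h : (x :: xs).length > c2.length
    · have hk : (x :: xs).length - c2.length = (xs.length - c2.length) + 1 := by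
        simp at h ⊢; omega
      rw [hk]
      simp only [cbeLoop1, if_pos h, List.take_succ_cons, List.drop_succ_cons, List.any_cons]
      by_cases hx : x > 0
      · simp [hx]
      · simp [hx, ih]
    · have hk : (x :: xs).length - c2.length = 0 := by simp at h ⊢; omega
      rw [hk]
      simp only [cbeLoop1]
      rw [if_neg h]
      simp

-- ===== VERDICT (by name: the statement is the Claim_ definition above) =====
theorem CompareBigEndian_spec : Claim_equal_CompareBigEndian := by
  intro c1 c2 _
  unfold Spec_CompareBigEndian CompareBigEndian CompareBigEndian_alt
  rw [cbeLoop1_char, cbeLoop2_char]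
  by_cases h12 : c1.length > c2.length
  · have hk1 : c1.length - c2.length ≤ c1.length := Nat.sub_le _ _
    have hd : (c1.drop (c1.length - c2.length)).length = c2.length := by
      simp [List.length_drop]; omega
    simp only [if_pos h12]
    by_cases ha : (c1.take (c1.length - c2.length)).any (fun x => x > 0)
    · simp [ha]
    · have h0 : c2.length - (c1.length - (c1.length - c2.length)) = 0 := by omega
      simp [ha, h0, cbeLoopEq_eq_zip]
  · by_cases h21 : c2.length > c1.length
    · have h1 : c1.length - c2.length = 0 := by omega
      simp only [if_neg h12, if_pos h21, h1, List.take_zero, List.any_nil, List.drop_zero,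
        Bool.false_eq_true, if_false]
      by_cases ha : (c2.take (c2.length - c1.length)).any (fun x => x > 0)
      · simp [ha]
      · simp [ha, cbeLoopEq_eq_zip]
    · have h1 : c1.length - c2.length = 0 := by omega
      have h2 : c2.length - c1.length = 0 := by omega
      simp [h1, h2, cbeLoopEq_eq_zip]
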